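-- pv_equiv track=rewrite | github.com/brand-new-remo/frontend-impact-analyzer | scripts/analyzer/project_scanner.py | _collect_reachable_deps
-- ===== SOURCE A (Python) =====
-- from typing import Dict, List, Optional, Tuple
--
-- def _collect_reachable_deps(start_file: str, imports: Dict[str, List[str]]) -> List[str]:
--     stack = list(imports.get(start_file, []))
--     seen = set()
--     ordered: List[str] = []
--     while stack:
--         dep = stack.pop(0)
--         if dep in seen:
--             continue
--         seen.add(dep)
--         ordered.append(dep)
--         stack.extend(imports.get(dep, []))
--     return ordered
-- ===== SOURCE B (Python) =====
-- from typing import Dict, List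
--
-- def _collect_reachable_deps(start_file: str, imports: Dict[str, List[str]]) -> List[str]:
--     # Fixed-point iteration: repeatedly append every child of every collected node
--     # and dedup (first occurrences), until the list stops growing. No queue, no seen set.
--     ordered = list(dict.fromkeys(imports.get(start_file, [])))
--     while True:
--         expanded = ordered + [c for d in ordered for c in imports.get(d, [])]
--         new = list(dict.fromkeys(expanded))
--         if new == ordered:
--             return ordered
--         ordered = new
-- ===== Notes on version B (the rewrite author's own statement) =====
-- stated objective: alternative
-- what changed: Replaces A's worklist BFS (FIFO queue with pop(0) and a seen set) by a queue-free fixed-point iteration: repeatedly re-expand the whole collected list with all children of its members and dedup by first occurrence (dict.fromkeys) until the list stops growing.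
import Mathlib
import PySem

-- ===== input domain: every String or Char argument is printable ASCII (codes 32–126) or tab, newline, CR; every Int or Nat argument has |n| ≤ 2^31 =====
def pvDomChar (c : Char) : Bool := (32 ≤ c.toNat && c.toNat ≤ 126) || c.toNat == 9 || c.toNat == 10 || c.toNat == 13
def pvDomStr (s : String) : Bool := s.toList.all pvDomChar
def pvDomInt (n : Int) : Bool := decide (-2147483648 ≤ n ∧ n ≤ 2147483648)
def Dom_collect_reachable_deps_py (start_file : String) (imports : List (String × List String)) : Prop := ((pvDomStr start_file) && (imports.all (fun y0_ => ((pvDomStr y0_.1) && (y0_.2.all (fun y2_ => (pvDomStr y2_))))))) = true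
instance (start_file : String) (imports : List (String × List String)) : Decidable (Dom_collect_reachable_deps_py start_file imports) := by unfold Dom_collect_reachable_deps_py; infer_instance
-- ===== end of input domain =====

-- B replaces A's FIFO-queue-with-seen-set BFS by a queue-free fixed-point iteration:
-- re-expand the whole collected list by all children of its members and dedup by first
-- occurrence until it stops growing; same return value, not claimed faster.

-- all strings that can ever be collected: the flattened dict values
def pvFlat (imports : List (String × List String)) : List String :=
  imports.flatMap (fun p => p.2)

-- imports.get(k, []) yields elements of pvFlat (used by the loops' termination)
theorem pvGetD_subset (imports : List (String × List String)) (k : String) :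
    ∀ x ∈ PySem.Dict.getD (PySem.Dict.mk imports) k [], x ∈ pvFlat imports := by
  induction imports with
  | nil => intro x hx; simp [PySem.Dict.getD, PySem.Dict.get?] at hx
  | cons p rest ih =>
    intro x hx
    rw [PySem.Dict.getD_eq_get?_getD] at hx
    rw [PySem.Dict.get?_mk_cons] at hx
    by_cases h : p.1 == k
    · simp [h] at hx
      exact List.mem_flatMap.2 ⟨p, List.mem_cons_self .., hx⟩
    · simp only [h, Bool.false_eq_true, if_false] at hx
      rw [← PySem.Dict.getD_eq_get?_getD] at hx
      have := ih x hx
      simp only [pvFlat, List.flatMap_cons] at *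
      exact List.mem_append_right _ this

-- a nodup list of elements of U is no longer than U (used by the loops' termination)
theorem pvNodupLen (seen U : List String) (h1 : seen.Nodup) (h2 : ∀ x ∈ seen, x ∈ U) :
    seen.length ≤ U.length :=
  (List.subperm_of_subset h1 h2).length_le

-- ===== PORT A =====
-- while stack: dep = stack.pop(0); if dep in seen: continue; seen.add(dep);
-- ordered.append(dep); stack.extend(imports.get(dep, []))
def pvLoopA (imports : List (String × List String)) (stack seen ordered : List String)
    (hst : ∀ x ∈ stack, x ∈ pvFlat imports)
    (hsn : seen.Nodup ∧ ∀ x ∈ seen, x ∈ pvFlat imports) : List String :=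
  match stack with
  | [] => ordered
  | dep :: rest =>
    if h : dep ∈ seen then
      pvLoopA imports rest seen ordered (fun x hx => hst x (List.mem_cons_of_mem _ hx)) hsn
    else
      pvLoopA imports (rest ++ PySem.Dict.getD (PySem.Dict.mk imports) dep [])
        (PySem.Set.add seen dep) (ordered ++ [dep])
        (by
          intro x hx
          rcases List.mem_append.1 hx with hx | hx
          · exact hst x (List.mem_cons_of_mem _ hx)
          · exact pvGetD_subset imports dep x hx)
        (by
          rw [PySem.Set.add_of_not_mem h]
          constructor
          · exact List.Nodup.append hsn.1 (List.nodup_singleton dep)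
              (by intro a ha hb; simp at hb; subst hb; exact h ha)
          · intro x hx
            rcases List.mem_append.1 hx with hx | hx
            · exact hsn.2 x hx
            · simp at hx; subst hx; exact hst x (List.mem_cons_self ..))
  termination_by ((pvFlat imports).length + 1 - seen.length, stack.length)
  decreasing_by
  · exact Prod.Lex.right _ (Nat.lt_succ_self _)
  · apply Prod.Lex.left
    rw [PySem.Set.add_of_not_mem h]
    have hle : seen.length ≤ (pvFlat imports).length :=
      pvNodupLen seen _ hsn.1 hsn.2
    simp only [List.length_append, List.length_singleton]
    omega

def collect_reachable_deps_py (start_file : String) (imports : List (String × List String)) : List String :=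
  pvLoopA imports (PySem.Dict.getD (PySem.Dict.mk imports) start_file []) [] []
    (pvGetD_subset imports start_file) ⟨List.nodup_nil, by simp⟩

-- ===== PORT B =====
-- expanded = ordered + [c for d in ordered for c in imports.get(d, [])]
def pvExpand (imports : List (String × List String)) (L : List String) : List String :=
  L ++ L.flatMap (fun d => PySem.Dict.getD (PySem.Dict.mk imports) d [])

-- folding Set.add only ever appends (termination of the loop)
theorem pvFoldl_add_pfx (r : List String) :
    ∀ s : List String, ∃ t, r.foldl PySem.Set.add s = s ++ t := by
  induction r with
  | nil => intro s; exact ⟨[], by simp⟩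
  | cons x r ih =>
    intro s
    by_cases h : x ∈ s
    · obtain ⟨t, ht⟩ := ih s
      exact ⟨t, by simp only [List.foldl_cons, PySem.Set.add_of_mem h, ht]⟩
    · obtain ⟨t, ht⟩ := ih (s ++ [x])
      exact ⟨[x] ++ t, by
        simp only [List.foldl_cons, PySem.Set.add_of_not_mem h, ht, List.append_assoc]⟩

-- the dedup of (L ++ r) keeps the nodup list L as a prefix (termination of the loop)
theorem pvDedup_append_pfx (L r : List String) (h : L.Nodup) :
    ∃ t, PySem.List.dedup (L ++ r) = L ++ t := by
  obtain ⟨t, ht⟩ := pvFoldl_add_pfx r L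
  refine ⟨t, ?_⟩
  have hL0 : List.foldl PySem.Set.add [] L = L := by
    rw [← PySem.Set.ofList_eq_foldl]
    exact PySem.Set.ofList_eq_self_of_nodup L h
  rw [PySem.List.dedup_eq_ofList, PySem.Set.ofList_eq_foldl, List.foldl_append, hL0, ht]

-- the measure strictly drops when the dedup-expansion step changes the list
theorem pvFixDec (imports : List (String × List String)) (L : List String)
    (hL : L.Nodup ∧ ∀ x ∈ L, x ∈ pvFlat imports)
    (hne : ¬ PySem.List.dedup (pvExpand imports L) = L) :
    (pvFlat imports).length + 1 - (PySem.List.dedup (pvExpand imports L)).length <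
      (pvFlat imports).length + 1 - L.length := by
  obtain ⟨t, ht⟩ := pvDedup_append_pfx L
    (L.flatMap (fun d => PySem.Dict.getD (PySem.Dict.mk imports) d [])) hL.1
  have hlen : (PySem.List.dedup (pvExpand imports L)).length ≤ (pvFlat imports).length := by
    refine pvNodupLen _ _ (PySem.List.nodup_dedup _) ?_
    intro x hx
    rw [PySem.List.mem_dedup] at hx
    rcases List.mem_append.1 hx with hx | hx
    · exact hL.2 x hx
    · obtain ⟨d, _, hxd⟩ := List.mem_flatMap.1 hx
      exact pvGetD_subset imports d x hxd
  have htne : t ≠ [] := by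
    intro h0; apply hne; unfold pvExpand; rw [ht, h0, List.append_nil]
  have : 0 < t.length := List.length_pos_iff.2 htne
  have : (PySem.List.dedup (pvExpand imports L)).length = L.length + t.length := by
    unfold pvExpand; rw [ht, List.length_append]
  omega

-- while True: new = dedup(ordered + expansion); if new == ordered: return ordered; ordered = new
def pvLoopFix (imports : List (String × List String)) (L : List String)
    (hL : L.Nodup ∧ ∀ x ∈ L, x ∈ pvFlat imports) : List String :=
  if hne : PySem.List.dedup (pvExpand imports L) = L then L
  else
    pvLoopFix imports (PySem.List.dedup (pvExpand imports L))
      ⟨PySem.List.nodup_dedup _, by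
        intro x hx
        rw [PySem.List.mem_dedup] at hx
        rcases List.mem_append.1 hx with hx | hx
        · exact hL.2 x hx
        · obtain ⟨d, _, hxd⟩ := List.mem_flatMap.1 hx
          exact pvGetD_subset imports d x hxd⟩
  termination_by (pvFlat imports).length + 1 - L.length
  decreasing_by exact pvFixDec imports L hL hne

-- ordered = list(dict.fromkeys(imports.get(start_file, []))) ; then the fixpoint loop
def collect_reachable_deps_py_alt (start_file : String) (imports : List (String × List String)) : List String :=
  pvLoopFix imports (PySem.List.dedup (PySem.Dict.getD (PySem.Dict.mk imports) start_file []))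
    ⟨PySem.List.nodup_dedup _, by
      intro x hx
      rw [PySem.List.mem_dedup] at hx
      exact pvGetD_subset imports start_file x hx⟩

-- ===== PRECONDITION & SPEC =====
def Spec_collect_reachable_deps_py (start_file : String) (imports : List (String × List String)) (out : List String) : Prop := out = collect_reachable_deps_py_alt start_file imports
instance (start_file : String) (imports : List (String × List String)) (out : List String) : Decidable (Spec_collect_reachable_deps_py start_file imports out) := by unfold Spec_collect_reachable_deps_py; infer_instance

-- ===== CLAIM (what is proved, stated in full; the proofs are below) =====
def Claim_equal_collect_reachable_deps_py : Prop := ∀ (start_file : String) (imports : List (String × List String)), Dom_collect_reachable_deps_py start_file imports → Spec_collect_reachable_deps_py start_file imports (collect_reachable_deps_py start_file imports)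

-- ===== LEMMAS AND PROOFS =====

-- pvNew xs seen: the elements of xs not in seen, first occurrences, in order
def pvNew : List String → List String → List String
  | [], _ => []
  | x :: r, seen => if x ∈ seen then pvNew r seen else x :: pvNew r (seen ++ [x])

theorem pvNew_of_forall_mem (xs : List String) :
    ∀ seen, (∀ x ∈ xs, x ∈ seen) → pvNew xs seen = [] := by
  induction xs with
  | nil => intro seen _; rfl
  | cons x r ih =>
    intro seen h
    simp only [pvNew, h x (List.mem_cons_self ..), if_true]
    exact ih seen (fun y hy => h y (List.mem_cons_of_mem _ hy))

theorem pvNew_append (a : List String) :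
    ∀ (b seen : List String), pvNew (a ++ b) seen = pvNew a seen ++ pvNew b (seen ++ pvNew a seen) := by
  induction a with
  | nil => intro b seen; simp [pvNew]
  | cons x r ih =>
    intro b seen
    by_cases h : x ∈ seen
    · simp only [List.cons_append, pvNew, h, if_true]; exact ih b seen
    · simp only [List.cons_append, pvNew, h, if_false]
      rw [ih b (seen ++ [x])]
      simp

theorem pvNew_cover (xs : List String) :
    ∀ (seen : List String) (x : String), x ∈ xs → x ∈ seen ∨ x ∈ pvNew xs seen := by
  induction xs with
  | nil => intro seen x hx; cases hx
  | cons a r ih =>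
    intro seen x hx
    by_cases h : a ∈ seen
    · simp only [pvNew, h, if_true]
      rcases List.mem_cons.1 hx with hx | hx
      · subst hx; exact Or.inl h
      · exact ih seen x hx
    · simp only [pvNew, h, if_false]
      rcases List.mem_cons.1 hx with hx | hx
      · subst hx; exact Or.inr (List.mem_cons_self ..)
      · rcases ih (seen ++ [a]) x hx with hm | hm
        · rcases List.mem_append.1 hm with hm | hm
          · exact Or.inl hm
          · simp at hm; subst hm; exact Or.inr (List.mem_cons_self ..)
        · exact Or.inr (List.mem_cons_of_mem _ hm)

theorem pvNew_self (xs : List String) :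
    ∀ seen, xs.Nodup → (∀ x ∈ xs, x ∉ seen) → pvNew xs seen = xs := by
  induction xs with
  | nil => intro seen _ _; rfl
  | cons x r ih =>
    intro seen hnd hdis
    simp only [pvNew, hdis x (List.mem_cons_self ..), if_false]
    rw [ih (seen ++ [x]) (List.nodup_cons.1 hnd).2]
    intro y hy hmem
    rcases List.mem_append.1 hmem with hm | hm
    · exact hdis y (List.mem_cons_of_mem _ hy) hm
    · simp at hm; subst hm; exact (List.nodup_cons.1 hnd).1 hy

-- folding Set.add is appending pvNew
theorem pvFoldl_add_eq (r : List String) :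
    ∀ seen : List String, r.foldl PySem.Set.add seen = seen ++ pvNew r seen := by
  induction r with
  | nil => intro seen; simp [pvNew]
  | cons x r ih =>
    intro seen
    by_cases h : x ∈ seen
    · simp only [List.foldl_cons, PySem.Set.add_of_mem h, pvNew, h, if_true]
      exact ih seen
    · simp only [List.foldl_cons, PySem.Set.add_of_not_mem h, pvNew, h, if_false]
      rw [ih (seen ++ [x])]
      simp

theorem pvDedup_eq_pvNew (xs : List String) : PySem.List.dedup xs = pvNew xs [] := by
  rw [PySem.List.dedup_eq_ofList, PySem.Set.ofList_eq_foldl, pvFoldl_add_eq]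
  simp

theorem pvDedup_append (L r : List String) (h : L.Nodup) :
    PySem.List.dedup (L ++ r) = L ++ pvNew r L := by
  rw [PySem.List.dedup_eq_ofList, PySem.Set.ofList_eq_foldl, List.foldl_append,
    pvFoldl_add_eq L [], List.nil_append, pvNew_self L [] h (by simp), pvFoldl_add_eq]

-- ===== the level-pass loop (proof-side model, bridging both ports) =====
-- one inner pass over a frontier: builds (next_frontier, seen, ordered)
def pvLevelB (imports : List (String × List String)) :
    List String → List String → List String → List String →
    List String × List String × List String
  | [], nxt, seen, ordered => (nxt, seen, ordered)
  | dep :: rest, nxt, seen, ordered =>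
    if dep ∉ seen then
      pvLevelB imports rest (nxt ++ PySem.Dict.getD (PySem.Dict.mk imports) dep [])
        (PySem.Set.add seen dep) (ordered ++ [dep])
    else
      pvLevelB imports rest nxt seen ordered

-- closed form of a level pass through pvNew
theorem pvLevelB_eq (imports : List (String × List String)) (f : List String) :
    ∀ (nxt seen ordered : List String),
      pvLevelB imports f nxt seen ordered =
        (nxt ++ (pvNew f seen).flatMap (fun d => PySem.Dict.getD (PySem.Dict.mk imports) d []),
         seen ++ pvNew f seen, ordered ++ pvNew f seen) := by
  induction f with
  | nil => intro nxt seen ordered; simp [pvLevelB, pvNew]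
  | cons dep rest ih =>
    intro nxt seen ordered
    by_cases h : dep ∈ seen
    · simp only [pvLevelB, h, not_true_eq_false, if_false, pvNew, if_true]
      exact ih nxt seen ordered
    · simp only [pvLevelB, h, not_false_eq_true, if_true, pvNew, if_false,
        PySem.Set.add_of_not_mem h]
      rw [ih]
      simp

-- the existence form used by pvLoopB's invariant obligations
theorem pvLevelB_spec (imports : List (String × List String)) (f : List String) :
    ∀ (nxt seen ordered : List String), ∃ t : List String,
      pvLevelB imports f nxt seen ordered =
        (nxt ++ t.flatMap (fun d => PySem.Dict.getD (PySem.Dict.mk imports) d []),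
         seen ++ t, ordered ++ t)
      ∧ (∀ x ∈ t, x ∈ f) ∧ t.Nodup ∧ (∀ x ∈ t, x ∉ seen) := by
  induction f with
  | nil => intro nxt seen ordered; exact ⟨[], by simp [pvLevelB], by simp, by simp, by simp⟩
  | cons dep rest ih =>
    intro nxt seen ordered
    by_cases h : dep ∈ seen
    · obtain ⟨t, heq, hsub, hnd, hns⟩ := ih nxt seen ordered
      refine ⟨t, ?_, ?_, hnd, hns⟩
      · simpa [pvLevelB, h] using heq
      · exact fun x hx => List.mem_cons_of_mem _ (hsub x hx)
    · obtain ⟨t, heq, hsub, hnd, hns⟩ :=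
        ih (nxt ++ PySem.Dict.getD (PySem.Dict.mk imports) dep []) (seen ++ [dep]) (ordered ++ [dep])
      refine ⟨dep :: t, ?_, ?_, ?_, ?_⟩
      · rw [show pvLevelB imports (dep :: rest) nxt seen ordered =
            pvLevelB imports rest (nxt ++ PySem.Dict.getD (PySem.Dict.mk imports) dep [])
              (PySem.Set.add seen dep) (ordered ++ [dep]) by simp [pvLevelB, h]]
        rw [PySem.Set.add_of_not_mem h, heq]
        simp
      · intro x hx
        rcases List.mem_cons.1 hx with hx | hx
        · subst hx; exact List.mem_cons_self ..
        · exact List.mem_cons_of_mem _ (hsub x hx)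
      · exact List.nodup_cons.2 ⟨fun hd => (hns dep hd) (by simp), hnd⟩
      · intro x hx
        rcases List.mem_cons.1 hx with hx | hx
        · subst hx; exact h
        · intro hx'; exact hns x hx (by simp [hx'])

-- proof-side level-by-level BFS loop
def pvLoopB (imports : List (String × List String)) (frontier seen ordered : List String)
    (hfr : ∀ x ∈ frontier, x ∈ pvFlat imports)
    (hsn : seen.Nodup ∧ ∀ x ∈ seen, x ∈ pvFlat imports) : List String :=
  if hfe : frontier = [] then ordered
  else
    pvLoopB imports (pvLevelB imports frontier [] seen ordered).1
      (pvLevelB imports frontier [] seen ordered).2.1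
      (pvLevelB imports frontier [] seen ordered).2.2
      (by
        obtain ⟨t, heq, hsub, hnd, hns⟩ := pvLevelB_spec imports frontier [] seen ordered
        rw [heq]
        intro x hx
        simp only [List.nil_append] at hx
        obtain ⟨d, _, hxd⟩ := List.mem_flatMap.1 hx
        exact pvGetD_subset imports d x hxd)
      (by
        obtain ⟨t, heq, hsub, hnd, hns⟩ := pvLevelB_spec imports frontier [] seen ordered
        rw [heq]
        constructor
        · exact List.Nodup.append hsn.1 hnd (fun a ha hb => (hns a hb) ha)
        · intro x hx
          rcases List.mem_append.1 hx with hx | hx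
          · exact hsn.2 x hx
          · exact hfr x (hsub x hx))
  termination_by ((pvFlat imports).length + 1 - seen.length, frontier.length)
  decreasing_by
    obtain ⟨t, heq, hsub, hnd, hns⟩ := pvLevelB_spec imports frontier [] seen ordered
    have hle : seen.length ≤ (pvFlat imports).length :=
      pvNodupLen seen _ hsn.1 hsn.2
    rw [heq]
    cases t with
    | nil =>
      simp only [List.flatMap_nil, List.append_nil, List.length_nil]
      exact Prod.Lex.right _ (List.length_pos_iff.2 hfe)
    | cons a t2 =>
      apply Prod.Lex.left
      simp only [List.length_append, List.length_cons]
      omega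

-- proof-irrelevant congruence and unfolds for pvLoopA / pvLoopB / pvLoopFix
theorem pvLoopA_congr (imports : List (String × List String))
    {a b c a2 b2 c2 : List String} (ha : a = a2) (hb : b = b2) (hc : c = c2)
    (h1 : ∀ x ∈ a, x ∈ pvFlat imports) (h2 : b.Nodup ∧ ∀ x ∈ b, x ∈ pvFlat imports)
    (h1a : ∀ x ∈ a2, x ∈ pvFlat imports) (h2a : b2.Nodup ∧ ∀ x ∈ b2, x ∈ pvFlat imports) :
    pvLoopA imports a b c h1 h2 = pvLoopA imports a2 b2 c2 h1a h2a := by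
  subst ha hb hc; rfl

theorem pvLoopA_nil (imports : List (String × List String)) (seen ordered : List String)
    (h1 : ∀ x ∈ ([] : List String), x ∈ pvFlat imports)
    (h2 : seen.Nodup ∧ ∀ x ∈ seen, x ∈ pvFlat imports) :
    pvLoopA imports [] seen ordered h1 h2 = ordered := by
  rw [pvLoopA]

theorem pvLoopA_cons_mem (imports : List (String × List String))
    (dep : String) (rest seen ordered : List String) (h : dep ∈ seen)
    (h1 : ∀ x ∈ dep :: rest, x ∈ pvFlat imports)
    (h2 : seen.Nodup ∧ ∀ x ∈ seen, x ∈ pvFlat imports)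
    (h1r : ∀ x ∈ rest, x ∈ pvFlat imports) :
    pvLoopA imports (dep :: rest) seen ordered h1 h2 =
    pvLoopA imports rest seen ordered h1r h2 := by
  rw [pvLoopA]; rw [dif_pos h]

theorem pvLoopA_cons_not_mem (imports : List (String × List String))
    (dep : String) (rest seen ordered : List String) (h : dep ∉ seen)
    (h1 : ∀ x ∈ dep :: rest, x ∈ pvFlat imports)
    (h2 : seen.Nodup ∧ ∀ x ∈ seen, x ∈ pvFlat imports)
    (h1r : ∀ x ∈ rest ++ PySem.Dict.getD (PySem.Dict.mk imports) dep [], x ∈ pvFlat imports)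
    (h2r : (PySem.Set.add seen dep).Nodup ∧ ∀ x ∈ PySem.Set.add seen dep, x ∈ pvFlat imports) :
    pvLoopA imports (dep :: rest) seen ordered h1 h2 =
    pvLoopA imports (rest ++ PySem.Dict.getD (PySem.Dict.mk imports) dep [])
      (PySem.Set.add seen dep) (ordered ++ [dep]) h1r h2r := by
  rw [pvLoopA]; rw [dif_neg h]

theorem pvLoopB_congr (imports : List (String × List String))
    {a b c a2 b2 c2 : List String} (ha : a = a2) (hb : b = b2) (hc : c = c2)
    (h1 : ∀ x ∈ a, x ∈ pvFlat imports) (h2 : b.Nodup ∧ ∀ x ∈ b, x ∈ pvFlat imports)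
    (h1a : ∀ x ∈ a2, x ∈ pvFlat imports) (h2a : b2.Nodup ∧ ∀ x ∈ b2, x ∈ pvFlat imports) :
    pvLoopB imports a b c h1 h2 = pvLoopB imports a2 b2 c2 h1a h2a := by
  subst ha hb hc; rfl

theorem pvLoopB_nil (imports : List (String × List String)) (seen ordered : List String)
    (h1 : ∀ x ∈ ([] : List String), x ∈ pvFlat imports)
    (h2 : seen.Nodup ∧ ∀ x ∈ seen, x ∈ pvFlat imports) :
    pvLoopB imports [] seen ordered h1 h2 = ordered := by
  rw [pvLoopB]; simp

theorem pvLoopB_step (imports : List (String × List String))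
    (frontier seen ordered : List String) (hfe : frontier ≠ [])
    (h1 : ∀ x ∈ frontier, x ∈ pvFlat imports)
    (h2 : seen.Nodup ∧ ∀ x ∈ seen, x ∈ pvFlat imports)
    (h1a : ∀ x ∈ (pvLevelB imports frontier [] seen ordered).1, x ∈ pvFlat imports)
    (h2a : (pvLevelB imports frontier [] seen ordered).2.1.Nodup ∧
      ∀ x ∈ (pvLevelB imports frontier [] seen ordered).2.1, x ∈ pvFlat imports) :
    pvLoopB imports frontier seen ordered h1 h2 =
    pvLoopB imports (pvLevelB imports frontier [] seen ordered).1
      (pvLevelB imports frontier [] seen ordered).2.1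
      (pvLevelB imports frontier [] seen ordered).2.2 h1a h2a := by
  rw [pvLoopB]; rw [dif_neg hfe]

theorem pvLoopFix_congr (imports : List (String × List String))
    {a a2 : List String} (ha : a = a2)
    (h1 : a.Nodup ∧ ∀ x ∈ a, x ∈ pvFlat imports)
    (h1a : a2.Nodup ∧ ∀ x ∈ a2, x ∈ pvFlat imports) :
    pvLoopFix imports a h1 = pvLoopFix imports a2 h1a := by
  subst ha; rfl

-- ===== A's queue loop equals the level loop (A-side bridge) =====
theorem pvLoopA_eq_level (imports : List (String × List String)) (f : List String) :
    ∀ (q seen ordered nx s2 o2 : List String),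
      pvLevelB imports f [] seen ordered = (nx, s2, o2) →
      ∀ (h1 : ∀ x ∈ f ++ q, x ∈ pvFlat imports)
        (h2 : seen.Nodup ∧ ∀ x ∈ seen, x ∈ pvFlat imports)
        (h1a : ∀ x ∈ q ++ nx, x ∈ pvFlat imports)
        (h2a : s2.Nodup ∧ ∀ x ∈ s2, x ∈ pvFlat imports),
      pvLoopA imports (f ++ q) seen ordered h1 h2 = pvLoopA imports (q ++ nx) s2 o2 h1a h2a := by
  induction f with
  | nil =>
    intro q seen ordered nx s2 o2 hlev h1 h2 h1a h2a
    simp only [pvLevelB] at hlev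
    cases hlev
    exact pvLoopA_congr imports (by simp) rfl rfl h1 h2 h1a h2a
  | cons dep rest ih =>
    intro q seen ordered nx s2 o2 hlev h1 h2 h1a h2a
    by_cases h : dep ∈ seen
    · have hlev2 : pvLevelB imports rest [] seen ordered = (nx, s2, o2) := by
        simpa [pvLevelB, h] using hlev
      have h1r : ∀ x ∈ rest ++ q, x ∈ pvFlat imports :=
        fun x hx => h1 x (List.mem_cons_of_mem _ hx)
      calc pvLoopA imports ((dep :: rest) ++ q) seen ordered h1 h2
          = pvLoopA imports (rest ++ q) seen ordered h1r h2 :=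
            pvLoopA_cons_mem imports dep (rest ++ q) seen ordered h h1 h2 h1r
        _ = pvLoopA imports (q ++ nx) s2 o2 h1a h2a :=
            ih q seen ordered nx s2 o2 hlev2 h1r h2 h1a h2a
    · have hdepU : dep ∈ pvFlat imports := h1 dep (List.mem_cons_self ..)
      have hadd : PySem.Set.add seen dep = seen ++ [dep] := PySem.Set.add_of_not_mem h
      set gd := PySem.Dict.getD (PySem.Dict.mk imports) dep [] with hgd
      set r := pvLevelB imports rest [] (seen ++ [dep]) (ordered ++ [dep]) with hrdef
      have hr : pvLevelB imports rest [] (seen ++ [dep]) (ordered ++ [dep]) =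
          (r.1, r.2.1, r.2.2) := rfl
      have hacc : ∀ (n0 s o : List String),
          pvLevelB imports rest n0 s o =
            (n0 ++ (pvLevelB imports rest [] s o).1,
             (pvLevelB imports rest [] s o).2.1, (pvLevelB imports rest [] s o).2.2) := by
        intro n0 s o; rw [pvLevelB_eq, pvLevelB_eq]; simp
      have hlev1 : pvLevelB imports (dep :: rest) [] seen ordered =
          (gd ++ r.1, r.2.1, r.2.2) := by
        show (if dep ∉ seen then
                pvLevelB imports rest ([] ++ gd) (PySem.Set.add seen dep) (ordered ++ [dep])
              else pvLevelB imports rest [] seen ordered) = _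
        rw [if_pos h, hadd, List.nil_append, hacc gd _ _, ← hrdef]
      rw [hlev1] at hlev
      have hnx : gd ++ r.1 = nx := congrArg Prod.fst hlev
      have hs2 : r.2.1 = s2 := congrArg (fun p => p.2.1) hlev
      have ho2 : r.2.2 = o2 := congrArg (fun p => p.2.2) hlev
      have h2n : (seen ++ [dep]).Nodup ∧ ∀ x ∈ seen ++ [dep], x ∈ pvFlat imports := by
        constructor
        · exact List.Nodup.append h2.1 (List.nodup_singleton dep)
            (by intro a ha hb; simp at hb; subst hb; exact h ha)
        · intro x hx
          rcases List.mem_append.1 hx with hx | hx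
          · exact h2.2 x hx
          · simp at hx; subst hx; exact hdepU
      have h1n : ∀ x ∈ rest ++ (q ++ gd), x ∈ pvFlat imports := by
        intro x hx
        rcases List.mem_append.1 hx with hx | hx
        · exact h1 x (List.mem_cons_of_mem _ (List.mem_append_left _ hx))
        · rcases List.mem_append.1 hx with hx | hx
          · exact h1 x (List.mem_cons_of_mem _ (List.mem_append_right _ hx))
          · exact pvGetD_subset imports dep x hx
      have happ : (q ++ gd) ++ r.1 = q ++ nx := by rw [List.append_assoc, hnx]
      have h1m : ∀ x ∈ (q ++ gd) ++ r.1, x ∈ pvFlat imports := by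
        rw [happ]; exact h1a
      have h2m : r.2.1.Nodup ∧ ∀ x ∈ r.2.1, x ∈ pvFlat imports := hs2 ▸ h2a
      calc pvLoopA imports ((dep :: rest) ++ q) seen ordered h1 h2
          = pvLoopA imports ((rest ++ q) ++ gd) (PySem.Set.add seen dep) (ordered ++ [dep])
              (by
                intro x hx
                rcases List.mem_append.1 hx with hx | hx
                · rcases List.mem_append.1 hx with hx | hx
                  · exact h1 x (List.mem_cons_of_mem _ (List.mem_append_left _ hx))
                  · exact h1 x (List.mem_cons_of_mem _ (List.mem_append_right _ hx))
                · exact pvGetD_subset imports dep x hx)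
              (hadd ▸ h2n) :=
            pvLoopA_cons_not_mem imports dep (rest ++ q) seen ordered h h1 h2 _ _
        _ = pvLoopA imports (rest ++ (q ++ gd)) (seen ++ [dep]) (ordered ++ [dep]) h1n h2n :=
            pvLoopA_congr imports (List.append_assoc ..) hadd rfl _ _ _ _
        _ = pvLoopA imports ((q ++ gd) ++ r.1) r.2.1 r.2.2 h1m h2m :=
            ih (q ++ gd) (seen ++ [dep]) (ordered ++ [dep]) r.1 r.2.1 r.2.2 hr h1n h2n h1m h2m
        _ = pvLoopA imports (q ++ nx) s2 o2 h1a h2a :=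
            pvLoopA_congr imports happ hs2 ho2 _ _ _ _

theorem pvLoopB_eq_loopA (imports : List (String × List String))
    (frontier seen ordered : List String)
    (hfr : ∀ x ∈ frontier, x ∈ pvFlat imports)
    (hsn : seen.Nodup ∧ ∀ x ∈ seen, x ∈ pvFlat imports) :
    pvLoopB imports frontier seen ordered hfr hsn =
    pvLoopA imports frontier seen ordered hfr hsn := by
  fun_induction pvLoopB imports frontier seen ordered hfr hsn with
  | case1 s o h1 h2 =>
    exact (pvLoopA_nil imports _ _ _ _).symm
  | case2 frontier seen ordered hfr hsn hfe ih =>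
    rw [ih]
    refine ((pvLoopA_eq_level imports frontier [] seen ordered
        (pvLevelB imports frontier [] seen ordered).1
        (pvLevelB imports frontier [] seen ordered).2.1
        (pvLevelB imports frontier [] seen ordered).2.2
        rfl
        (by intro x hx; exact hfr x (by simpa using hx)) hsn
        (by intro x hx; simp only [List.nil_append] at hx
            obtain ⟨t, heq, hsub, hnd, hns⟩ := pvLevelB_spec imports frontier [] seen ordered
            rw [heq] at hx
            simp only [List.nil_append] at hx
            obtain ⟨d, _, hxd⟩ := List.mem_flatMap.1 hx
            exact pvGetD_subset imports d x hxd)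
        (by
            obtain ⟨t, heq, hsub, hnd, hns⟩ := pvLevelB_spec imports frontier [] seen ordered
            rw [heq]
            refine ⟨List.Nodup.append hsn.1 hnd (fun a ha hb => (hns a hb) ha), ?_⟩
            intro x hx
            rcases List.mem_append.1 hx with hx | hx
            · exact hsn.2 x hx
            · exact hfr x (hsub x hx))).symm.trans ?_)
    exact pvLoopA_congr imports (by simp) rfl rfl _ _ _ _

-- ===== B's fixpoint loop equals the level loop (B-side bridge) =====
theorem pvFix_eq_loopB (imports : List (String × List String)) :
    ∀ (n : ℕ) (L : List String)
      (hL : L.Nodup ∧ ∀ x ∈ L, x ∈ pvFlat imports)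
      (f : List String) (hf : ∀ x ∈ f, x ∈ pvFlat imports),
      (pvFlat imports).length + 1 - L.length ≤ n →
      pvNew (L.flatMap (fun d => PySem.Dict.getD (PySem.Dict.mk imports) d [])) L = pvNew f L →
      pvLoopFix imports L hL = pvLoopB imports f L L hf hL := by
  intro n
  induction n with
  | zero =>
    intro L hL f hf hn _
    have := pvNodupLen L _ hL.1 hL.2
    omega
  | succ n ih =>
    intro L hL f hf hn hinv
    have hch : PySem.List.dedup (pvExpand imports L) =
        L ++ pvNew f L := by
      rw [pvExpand, pvDedup_append _ _ hL.1, hinv]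
    by_cases hstop : PySem.List.dedup (pvExpand imports L) = L
    · rw [pvLoopFix]; rw [dif_pos hstop]
      have ht0 : pvNew f L = [] := by
        have h0 : L ++ pvNew f L = L ++ [] := by rw [← hch, hstop, List.append_nil]
        exact List.append_cancel_left h0
      by_cases hfe : f = []
      · subst hfe; exact (pvLoopB_nil imports L L _ _).symm
      · rw [pvLoopB_step imports f L L hfe hf hL
          (by rw [pvLevelB_eq, ht0]; simp)
          (by rw [pvLevelB_eq, ht0]; simpa using hL)]
        refine ((pvLoopB_congr imports (a2 := []) (b2 := L) (c2 := L)
          (by rw [pvLevelB_eq, ht0]; simp) (by rw [pvLevelB_eq, ht0]; simp)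
          (by rw [pvLevelB_eq, ht0]; simp) _ _ (by simp) hL).trans ?_).symm
        exact pvLoopB_nil imports L L _ _
    · have htne : pvNew f L ≠ [] := by
        intro h0; apply hstop; rw [hch, h0, List.append_nil]
      have hfe : f ≠ [] := by
        intro h0; apply htne; rw [h0]; rfl
      have hnewL : L.length < (PySem.List.dedup (pvExpand imports L)).length := by
        rw [hch, List.length_append]
        have := List.length_pos_iff.2 htne
        omega
      have hLnew : (PySem.List.dedup (pvExpand imports L)).length ≤ (pvFlat imports).length :=
        pvNodupLen _ _ (PySem.List.nodup_dedup _)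
          (by
            intro x hx
            rw [PySem.List.mem_dedup] at hx
            rcases List.mem_append.1 hx with hx | hx
            · exact hL.2 x hx
            · obtain ⟨d, _, hxd⟩ := List.mem_flatMap.1 hx
              exact pvGetD_subset imports d x hxd)
      -- new state facts
      have hsubnew : ∀ x ∈ L ++ pvNew f L, x ∈ pvFlat imports := by
        rw [← hch]
        intro x hx
        rw [PySem.List.mem_dedup] at hx
        rcases List.mem_append.1 hx with hx | hx
        · exact hL.2 x hx
        · obtain ⟨d, _, hxd⟩ := List.mem_flatMap.1 hx
          exact pvGetD_subset imports d x hxd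
      have hndnew : (L ++ pvNew f L).Nodup := by
        rw [← hch]; exact PySem.List.nodup_dedup _
      -- the recursive invariant at (L ++ pvNew f L, (pvNew f L).flatMap children)
      have hcov : ∀ x ∈ L.flatMap (fun d => PySem.Dict.getD (PySem.Dict.mk imports) d []),
          x ∈ L ++ pvNew f L := by
        intro x hx
        rcases pvNew_cover _ L x hx with hm | hm
        · exact List.mem_append_left _ hm
        · rw [hinv] at hm; exact List.mem_append_right _ hm
      have hinv2 : pvNew ((L ++ pvNew f L).flatMap (fun d => PySem.Dict.getD (PySem.Dict.mk imports) d []))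
            (L ++ pvNew f L) =
          pvNew ((pvNew f L).flatMap (fun d => PySem.Dict.getD (PySem.Dict.mk imports) d [])) (L ++ pvNew f L) := by
        rw [List.flatMap_append, pvNew_append,
          pvNew_of_forall_mem _ _ hcov]
        simp
      -- step both loops
      rw [pvLoopFix]; rw [dif_neg hstop]
      rw [pvLoopB_step imports f L L hfe hf hL
        (by rw [pvLevelB_eq]; intro x hx; simp only [List.nil_append] at hx
            obtain ⟨d, _, hxd⟩ := List.mem_flatMap.1 hx
            exact pvGetD_subset imports d x hxd)
        (by rw [pvLevelB_eq]; exact ⟨hndnew, hsubnew⟩)]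
      have hstep := ih (L ++ pvNew f L) ⟨hndnew, hsubnew⟩
        ((pvNew f L).flatMap (fun d => PySem.Dict.getD (PySem.Dict.mk imports) d []))
        (by intro x hx
            obtain ⟨d, _, hxd⟩ := List.mem_flatMap.1 hx
            exact pvGetD_subset imports d x hxd)
        (by rw [hch] at hnewL hLnew; rw [List.length_append] at hnewL hLnew ⊢; omega)
        hinv2
      refine ((pvLoopFix_congr imports hch _ _).trans hstep).trans ?_
      exact pvLoopB_congr imports (by rw [pvLevelB_eq]; simp) (by rw [pvLevelB_eq])
        (by rw [pvLevelB_eq]) _ _ _ _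

-- initialisation: B's start state corresponds to one level pass from A's start state
theorem pvFix_init (imports : List (String × List String)) (f0 : List String)
    (hf : ∀ x ∈ f0, x ∈ pvFlat imports)
    (hd : (PySem.List.dedup f0).Nodup ∧ ∀ x ∈ PySem.List.dedup f0, x ∈ pvFlat imports) :
    pvLoopFix imports (PySem.List.dedup f0) hd =
    pvLoopB imports f0 [] [] hf ⟨List.nodup_nil, by simp⟩ := by
  have hd0 : PySem.List.dedup f0 = pvNew f0 [] := pvDedup_eq_pvNew f0
  by_cases hfe : f0 = []
  · subst hfe
    have h0 : PySem.List.dedup ([] : List String) = [] := by rw [pvDedup_eq_pvNew]; rfl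
    rw [pvLoopFix]
    rw [dif_pos (by unfold pvExpand; simp only [h0, List.flatMap_nil, List.append_nil])]
    rw [pvLoopB_nil imports [] [] _ _, h0]
  · rw [pvLoopB_step imports f0 [] [] hfe hf _
      (by rw [pvLevelB_eq]; intro x hx; simp only [List.nil_append] at hx
          obtain ⟨d, _, hxd⟩ := List.mem_flatMap.1 hx
          exact pvGetD_subset imports d x hxd)
      (by rw [pvLevelB_eq]; rw [← hd0]; simpa using hd)]
    refine (pvFix_eq_loopB imports ((pvFlat imports).length + 1) (PySem.List.dedup f0) hd
      ((pvNew f0 []).flatMap (fun d => PySem.Dict.getD (PySem.Dict.mk imports) d []))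
      (by intro x hx
          obtain ⟨d, _, hxd⟩ := List.mem_flatMap.1 hx
          exact pvGetD_subset imports d x hxd)
      (by omega)
      (by rw [hd0])).trans ?_
    exact pvLoopB_congr imports (by rw [pvLevelB_eq]; simp) (by rw [pvLevelB_eq]; simpa using hd0)
      (by rw [pvLevelB_eq]; simpa using hd0) _ _ _ _

-- ===== VERDICT (by name: the statement is the Claim_ definition above) =====
theorem collect_reachable_deps_py_spec : Claim_equal_collect_reachable_deps_py := by
  intro start_file imports _
  unfold Spec_collect_reachable_deps_py collect_reachable_deps_py collect_reachable_deps_py_alt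
  rw [pvFix_init imports _ (pvGetD_subset imports start_file)]
  exact (pvLoopB_eq_loopA imports _ [] [] _ _).symm
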